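-- pv_equiv track=rewrite | github.com/An-20/advent-of-code-2023 | day14/p2.py | multi_step
-- ===== SOURCE A (Python) =====
-- from typing import List, Iterable
--
-- def single_step(col: List) -> List:
--     new_col = []
--     for char in col:
--         if char in "#.":
--             new_col.append(char)
--         else:
--             if new_col and new_col[-1] == ".":
--                 new_col[-1] = "O"
--                 new_col.append(".")
--             else:
--                 new_col.append("O")
--     return new_col
--
-- def multi_step(cols: List[List]) -> List[List]:
--     new_cols = []
--     for col in cols:
--         while True:
--             new_col = single_step(col)
--             if new_col == col:
--                 break
--             col = new_col
--         new_cols.append(new_col)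
--     return new_cols
-- ===== SOURCE B (Python) =====
-- def multi_step(cols):
--     # One linear pass per column: within each "#"-delimited segment,
--     # rocks roll to the front, so emit all "O"s, then all "."s, then "#".
--     def tilt(col):
--         out = []
--         rocks = 0
--         dots = 0
--         for ch in col:
--             if ch == ".":
--                 dots += 1
--             elif ch == "#":
--                 out += ["O"] * rocks + ["."] * dots + ["#"]
--                 rocks = 0
--                 dots = 0
--             else:
--                 rocks += 1
--         return out + ["O"] * rocks + ["."] * dots
--     return [tilt(col) for col in cols]
-- ===== Notes on version B (the rewrite author's own statement) =====
-- stated objective: faster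
-- what changed: A repeatedly re-scans each column with single bubble passes until a fixpoint; B makes one linear pass per column, counting rocks and dots of each '#'-delimited segment and emitting the packed segment directly; Pre_ excludes grids containing the malformed cells '' or '#.' (not single grid characters), which A's substring test `char in "#."` accidentally treats as stationary while B's natural cell test treats them as rocks.
-- outside the precondition, e.g. on multi_step([['']]): A returns [['']], B returns [['O']]; on multi_step([['#.']]): A returns [['#.']], B returns [['O']]
import Mathlib
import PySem

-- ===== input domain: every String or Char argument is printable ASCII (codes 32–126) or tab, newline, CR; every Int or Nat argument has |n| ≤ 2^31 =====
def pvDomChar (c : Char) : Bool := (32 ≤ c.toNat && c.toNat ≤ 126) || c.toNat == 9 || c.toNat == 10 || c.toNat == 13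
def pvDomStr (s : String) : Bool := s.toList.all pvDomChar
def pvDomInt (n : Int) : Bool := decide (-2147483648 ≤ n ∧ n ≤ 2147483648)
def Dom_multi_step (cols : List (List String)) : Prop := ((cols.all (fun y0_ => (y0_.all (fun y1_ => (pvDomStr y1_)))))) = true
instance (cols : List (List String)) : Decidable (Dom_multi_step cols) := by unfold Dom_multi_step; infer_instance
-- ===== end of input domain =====

-- B replaces A's repeated bubble passes (iterated to a fixpoint) by one linear pass per
-- column that packs each '#'-delimited segment as rocks-then-dots; A = B on every grid
-- whose cells are actual single characters (Pre_ excludes the non-cells "" and "#.").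

-- ===== PORT A =====
-- Python 'char in "#."' is substring containment: PySem.Str.isIn char "#." (exact).
-- singleGo is single_step's 'for char in col' loop with its accumulator new_col;
-- 'new_col and new_col[-1] == "."' is getLast? = some "."; 'new_col[-1] = "O"' then
-- 'new_col.append(".")' is dropLast ++ ["O", "."].
def singleGo (newCol : List String) : List String → List String
  | [] => newCol
  | ch :: rest =>
    if PySem.Str.isIn ch "#." then singleGo (newCol ++ [ch]) rest
    else if newCol.getLast? = some "." then singleGo (newCol.dropLast ++ ["O", "."]) rest
    else singleGo (newCol ++ ["O"]) rest

def single_step (col : List String) : List String := singleGo [] col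

-- ---- the measure bounding A's 'while True' loop (strict decrease proved in mu_dec below) ----
def stat (c : String) : Bool := PySem.Str.isIn c "#."

def Rk : List String → Nat
  | [] => 0
  | c :: t => (if stat c then 0 else 1) + Rk t

def NOk : List String → Nat
  | [] => 0
  | c :: t => (if ¬ stat c = true ∧ c ≠ "O" then 1 else 0) + NOk t

def invk : List String → Nat
  | [] => 0
  | c :: t => (if c = "." then Rk t else 0) + invk t

def mu (l : List String) : Nat := 2 * invk l + (if NOk l = 0 then 0 else 1)

-- the 'while True' loop of multi_step, ported with an explicit fuel bound that merely
-- makes the same computation total (mu strictly decreases per pass, proved in mu_dec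
-- below, so the fuel mu col + 1 is never exhausted and the 0 branch is unreachable)
def loopGo : Nat → List String → List String
  | 0, col => col
  | f + 1, col =>
    let new_col := single_step col
    if new_col = col then new_col else loopGo f new_col

def loopA (col : List String) : List String := loopGo (mu col + 1) col

def multi_step (cols : List (List String)) : List (List String) :=
  cols.foldl (fun new_cols col => new_cols ++ [loopA col]) []

-- ===== PORT B =====
-- one pass per column over state (out, rocks, dots); a segment ends at "#"

def tiltCol (col : List String) : List String :=
  let st := col.foldl (fun (s : List String × Nat × Nat) ch =>
    if ch = "." then (s.1, s.2.1, s.2.2 + 1)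
    else if ch = "#" then
      (s.1 ++ List.replicate s.2.1 "O" ++ List.replicate s.2.2 "." ++ ["#"], 0, 0)
    else (s.1, s.2.1 + 1, s.2.2)) ([], 0, 0)
  st.1 ++ List.replicate st.2.1 "O" ++ List.replicate st.2.2 "."

def multi_step_alt (cols : List (List String)) : List (List String) :=
  cols.map tiltCol

-- ===== PRECONDITION & SPEC =====
-- Pre_ restricts to grids whose cells are actual single characters in the relevant sense:
-- it excludes the non-cell strings "" and "#.", which A's substring test 'char in "#."'
-- accidentally treats as stationary blockers while B's natural cell test treats as rocks.
def Pre_multi_step (cols : List (List String)) : Prop :=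
  ∀ col ∈ cols, ∀ c ∈ col, c ≠ "" ∧ c ≠ "#."
instance (cols : List (List String)) : Decidable (Pre_multi_step cols) := by
  unfold Pre_multi_step; infer_instance

def pvWitness_multi_step : List (List String) := [["O", ".", "#", ".", "O"], [".", "O"]]

def Spec_multi_step (cols : List (List String)) (out : List (List String)) : Prop := out = multi_step_alt cols
instance (cols : List (List String)) (out : List (List String)) : Decidable (Spec_multi_step cols out) := by unfold Spec_multi_step; infer_instance

-- ===== CLAIM (what is proved, stated in full; the proofs are below) =====
def Claim_equal_multi_step : Prop := ∀ (cols : List (List String)), Dom_multi_step cols → Pre_multi_step cols → Spec_multi_step cols (multi_step cols)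

-- ===== LEMMAS AND PROOFS =====

-- structural characterisation of a single bubble pass (proof-side only)
mutual
def Sf : List String → List String
  | [] => []
  | c :: t => if c = "." then Df t else if stat c then c :: Sf t else "O" :: Sf t
def Df : List String → List String
  | [] => ["."]
  | c :: t => if c = "." then "." :: Df t else if stat c then "." :: c :: Sf t else "O" :: Df t
end


theorem singleGo_acc (t : List String) : ∀ (acc : List String) (a : String),
    singleGo (acc ++ [a]) t = acc ++ singleGo [a] t := by
  induction t with
  | nil => intro acc a; simp [singleGo]
  | cons c t ih =>
    intro acc a
    by_cases hc : PySem.Str.isIn c "#." = true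
    · simp only [singleGo, hc, if_pos]
      rw [show acc ++ [a] ++ [c] = (acc ++ [a]) ++ [c] from rfl, ih (acc ++ [a]) c,
          show ([a] ++ [c] : List String) = [a] ++ [c] from rfl, ih [a] c]
      simp
    · by_cases ha : a = "."
      · subst ha
        have h1 : (acc ++ ["."]).getLast? = some "." := by simp
        have h2 : ([("." : String)]).getLast? = some "." := by simp
        simp only [singleGo, hc, Bool.false_eq_true, if_false, h1, h2, if_true, if_pos]
        rw [show (acc ++ ["."]).dropLast ++ ["O", "."] = (acc ++ ["O"]) ++ ["."] by simp,
            ih (acc ++ ["O"]) "."]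
        rw [show ([("." : String)]).dropLast ++ ["O", "."] = ["O"] ++ ["."] by simp,
            ih ["O"] "."]
        simp
      · have h1 : ¬ ((acc ++ [a]).getLast? = some ".") := by simp [ha]
        have h2 : ¬ (([a]).getLast? = some (".":String)) := by simp [ha]
        simp only [singleGo, hc, Bool.false_eq_true, if_false, h1, h2, if_neg, ite_false]
        rw [show acc ++ [a] ++ ["O"] = (acc ++ [a]) ++ ["O"] from rfl, ih (acc ++ [a]) "O",
            ih [a] "O"]
        simp

theorem singleGo_fresh (t : List String) (a : String) (ha : a ≠ ".") :
    singleGo [a] t = a :: singleGo [] t := by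
  cases t with
  | nil => simp [singleGo]
  | cons c t =>
    by_cases hc : PySem.Str.isIn c "#." = true
    · simp only [singleGo, hc, if_pos]
      rw [show ([a] ++ [c] : List String) = [a] ++ [c] from rfl, singleGo_acc t [a] c]
      simp [singleGo]
    · have h2 : ¬ (([a]).getLast? = some (".":String)) := by simp [ha]
      simp only [singleGo, hc, Bool.false_eq_true, if_false, h2, List.getLast?_nil,
        reduceCtorEq, ite_false]
      rw [singleGo_acc t [a] "O"]
      simp

theorem singleGo_SD (t : List String) :
    singleGo [] t = Sf t ∧ singleGo ["."] t = Df t := by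
  induction t with
  | nil => exact ⟨rfl, rfl⟩
  | cons c t ih =>
    have hdot : PySem.Str.isIn "." "#." = true := by decide
    constructor
    · by_cases hd : c = "."
      · subst hd
        simp only [singleGo, hdot, if_pos, List.nil_append, Sf, if_pos rfl]
        exact ih.2
      · by_cases hc : stat c = true
        · have hc' : PySem.Str.isIn c "#." = true := hc
          simp only [singleGo, hc', if_pos, List.nil_append, Sf, if_neg hd, hc]
          all_goals simp [singleGo_fresh t c hd, ih.1]
        · have hc' : ¬ PySem.Str.isIn c "#." = true := hc
          simp only [singleGo, hc', Bool.false_eq_true, if_false, List.getLast?_nil,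
            reduceCtorEq, ite_false, List.nil_append, Sf, if_neg hd,
            if_neg (show ¬ stat c = true from hc)]
          rw [singleGo_fresh t "O" (by decide), ih.1]
    · by_cases hd : c = "."
      · subst hd
        simp only [singleGo, hdot, if_pos, Df, if_pos rfl]
        rw [singleGo_acc t ["."] ".", ih.2]
        simp
      · by_cases hc : stat c = true
        · have hc' : PySem.Str.isIn c "#." = true := hc
          simp only [singleGo, hc', if_pos, Df, if_neg hd, hc, ite_true]
          rw [singleGo_acc t ["."] c, singleGo_fresh t c hd, ih.1]
          simp
        · have hc' : ¬ PySem.Str.isIn c "#." = true := hc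
          have hl : (["."] : List String).getLast? = some "." := by simp
          simp only [singleGo, hc', Bool.false_eq_true, if_false, hl, ite_true, Df, if_neg hd,
            if_neg (show ¬ stat c = true from hc)]
          rw [show (["."] : List String).dropLast ++ ["O", "."] = ["O"] ++ ["."] by simp,
              singleGo_acc t ["O"] ".", ih.2]
          simp

theorem Rk_SD (t : List String) : Rk (Sf t) = Rk t ∧ Rk (Df t) = Rk t := by
  induction t with
  | nil => exact ⟨rfl, rfl⟩
  | cons c t ih =>
    have hO : stat "O" = false := by decide
    have hdot : stat "." = true := by decide
    constructor
    · by_cases hd : c = "."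
      · subst hd; simpa [Sf, Rk, hdot] using ih.2
      · by_cases hc : stat c = true
        · simp [Sf, if_neg hd, hc, Rk, ih.1]
        · simp [Sf, if_neg hd, hc, Rk, hO, ih.1]
    · by_cases hd : c = "."
      · subst hd; simp [Df, Rk, hdot, ih.2]
      · by_cases hc : stat c = true
        · simp [Df, if_neg hd, hc, Rk, hdot, ih.1]
        · simp [Df, if_neg hd, hc, Rk, hO, hdot, ih.2]

theorem NOk_SD (t : List String) : NOk (Sf t) = 0 ∧ NOk (Df t) = 0 := by
  induction t with
  | nil => exact ⟨rfl, rfl⟩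
  | cons c t ih =>
    have hO : stat "O" = false := by decide
    have hdot : stat "." = true := by decide
    constructor
    · by_cases hd : c = "."
      · subst hd; simpa [Sf] using ih.2
      · by_cases hc : stat c = true
        · simp [Sf, if_neg hd, hc, NOk, ih.1]
        · simp [Sf, if_neg hd, hc, NOk, hO, ih.1]
    · by_cases hd : c = "."
      · subst hd; simp [Df, NOk, hdot, ih.2]
      · by_cases hc : stat c = true
        · simp [Df, if_neg hd, hc, NOk, hdot, ih.1]
        · simp [Df, if_neg hd, hc, NOk, hO, hdot, ih.2]

theorem invk_SD (t : List String) :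
    invk (Sf t) ≤ invk t ∧ invk (Df t) ≤ invk t + Rk t := by
  induction t with
  | nil => simp [Sf, Df, invk, Rk]
  | cons c t ih =>
    have hO : stat "O" = false := by decide
    have hdot : stat "." = true := by decide
    constructor
    · by_cases hd : c = "."
      · subst hd
        have := ih.2
        simp [Sf, if_pos rfl, invk, if_pos rfl]
        omega
      · by_cases hc : stat c = true
        · have := ih.1
          simp [Sf, if_neg hd, hc, ite_true, invk, if_neg hd]
          omega
        · have := ih.1
          simp [Sf, if_neg hd, hc, Bool.false_eq_true, ite_false, invk,
            if_neg hd, if_neg (show ¬ ("O" : String) = "." by decide)]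
          omega
    · by_cases hd : c = "."
      · subst hd
        have h1 := ih.2
        have h2 := (Rk_SD t).2
        simp [Df, if_pos rfl, invk, if_pos rfl, Rk, hdot, ite_true]
        omega
      · by_cases hc : stat c = true
        · have h1 := ih.1
          have h2 := (Rk_SD t).1
          simp [Df, if_neg hd, hc, ite_true, invk, if_pos rfl, if_neg hd, Rk, hc, hdot]
          omega
        · have h1 := ih.2
          simp [Df, if_neg hd, hc, Bool.false_eq_true, ite_false, invk,
            if_neg (show ¬ ("O" : String) = "." by decide), if_neg hd, Rk, hc]
          omega

theorem invk_SD_strict (t : List String) :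
    (NOk t = 0 → Sf t ≠ t → invk (Sf t) < invk t) ∧
    (NOk t = 0 → Df t ≠ "." :: t → invk (Df t) < invk t + Rk t) := by
  induction t with
  | nil =>
    refine ⟨fun _ h => ?_, fun _ h => ?_⟩
    · exact absurd (show Sf [] = [] from rfl) h
    · exact absurd (show Df [] = ["."] from rfl) h
  | cons c t ih =>
    have hO : stat "O" = false := by decide
    have hdot : stat "." = true := by decide
    constructor
    · intro hno hne
      by_cases hd : c = "."
      · subst hd
        have hno' : NOk t = 0 := by simpa [NOk, hdot] using hno
        have hne' : Df t ≠ "." :: t := by simpa [Sf] using hne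
        have := ih.2 hno' hne'
        simp [Sf, if_pos rfl, invk, if_pos rfl]
        omega
      · by_cases hc : stat c = true
        · have hno' : NOk t = 0 := by simpa [NOk, hc] using hno
          have hne' : Sf t ≠ t := by
            intro h; apply hne; simp [Sf, if_neg hd, hc, h]
          have := ih.1 hno' hne'
          simp [Sf, if_neg hd, hc, ite_true, invk, if_neg hd]
          omega
        · have hcO : c = "O" := by
            by_contra hcc
            have : NOk (c :: t) ≠ 0 := by simp [NOk, hc, hcc]
            exact this hno
          subst hcO
          have hno' : NOk t = 0 := by simpa [NOk, hO] using hno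
          have hne' : Sf t ≠ t := by
            intro h; apply hne; simp [Sf, hO, h]
          have := ih.1 hno' hne'
          simp [Sf, hO, Bool.false_eq_true, ite_false,
            if_neg (show ¬ ("O" : String) = "." by decide), invk]
          omega
    · intro hno hne
      by_cases hd : c = "."
      · subst hd
        have hno' : NOk t = 0 := by simpa [NOk, hdot] using hno
        have hne' : Df t ≠ "." :: t := by
          intro h; apply hne; simp [Df, h]
        have h1 := ih.2 hno' hne'
        have h2 := (Rk_SD t).2
        simp [Df, if_pos rfl, invk, if_pos rfl, Rk, hdot, ite_true]
        omega
      · by_cases hc : stat c = true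
        · have hno' : NOk t = 0 := by simpa [NOk, hc] using hno
          have hne' : Sf t ≠ t := by
            intro h; apply hne; simp [Df, if_neg hd, hc, h]
          have h1 := ih.1 hno' hne'
          have h2 := (Rk_SD t).1
          simp [Df, if_neg hd, hc, ite_true, invk, if_pos rfl, if_neg hd, Rk, hc, hdot]
          omega
        · have hcO : c = "O" := by
            by_contra hcc
            have : NOk (c :: t) ≠ 0 := by simp [NOk, hc, hcc]
            exact this hno
          subst hcO
          have hno' : NOk t = 0 := by simpa [NOk, hO] using hno
          have h1 := (invk_SD t).2
          simp [Df, hO, Bool.false_eq_true, ite_false, invk,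
            if_neg (show ¬ ("O" : String) = "." by decide), Rk, hO]
          omega

theorem mu_dec (t : List String) (h : single_step t ≠ t) : mu (single_step t) < mu t := by
  have hS : single_step t = Sf t := (singleGo_SD t).1
  rw [hS] at h ⊢
  have hNO : NOk (Sf t) = 0 := (NOk_SD t).1
  by_cases hno : NOk t = 0
  · have := (invk_SD_strict t).1 hno h
    simp only [mu, hNO, ite_true, if_pos rfl]
    omega
  · have := (invk_SD t).1
    simp only [mu, hNO, ite_true, if_pos rfl, if_neg hno]
    omega


theorem infix_pair (a b : Char) (l : List Char) :
    l <:+: [a, b] ↔ l = [] ∨ l = [a] ∨ l = [b] ∨ l = [a, b] := by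
  constructor
  · rintro ⟨s, t, h⟩
    rcases s with _ | ⟨x, s⟩
    · rcases l with _ | ⟨y, l⟩
      · simp
      · simp only [List.nil_append, List.cons_append, List.cons.injEq] at h
        obtain ⟨rfl, h⟩ := h
        rcases l with _ | ⟨z, l⟩
        · right; left; rfl
        · simp only [List.cons_append, List.cons.injEq] at h
          obtain ⟨rfl, h⟩ := h
          have hl : l = [] := by
            cases l with
            | nil => rfl
            | cons w l => simp at h
          subst hl
          right; right; right; rfl
    · simp only [List.cons_append, List.cons.injEq] at h
      obtain ⟨rfl, h⟩ := h
      rcases s with _ | ⟨y, s⟩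
      · rcases l with _ | ⟨z, l⟩
        · left; rfl
        · simp only [List.nil_append, List.cons_append, List.cons.injEq] at h
          obtain ⟨rfl, h⟩ := h
          have hl : l = [] := by
            cases l with
            | nil => rfl
            | cons w l => simp at h
          subst hl
          right; right; left; rfl
      · simp only [List.cons_append, List.cons.injEq] at h
        obtain ⟨rfl, h⟩ := h
        have hl : l = [] := by
          cases l with
          | nil => rfl
          | cons w l => simp at h
        subst hl
        left; rfl
  · rintro (rfl | rfl | rfl | rfl)
    · exact List.nil_infix
    · exact ⟨[], [b], rfl⟩
    · exact ⟨[a], [], by simp⟩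
    · exact List.infix_rfl

theorem stat_iff (c : String) :
    stat c = true ↔ (c = "" ∨ c = "#" ∨ c = "." ∨ c = "#.") := by
  unfold stat
  rw [PySem.Str.isIn_iff_infix]
  have h2 : ("#." : String).toList = ['#', '.'] := rfl
  rw [h2, infix_pair]
  constructor
  · rintro (h | h | h | h)
    · left; exact String.toList_inj.mp (by simpa using h)
    · right; left; exact String.toList_inj.mp (by simpa using h)
    · right; right; left; exact String.toList_inj.mp (by simpa using h)
    · right; right; right; exact String.toList_inj.mp (by simpa using h)
  · rintro (rfl | rfl | rfl | rfl) <;> simp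

theorem blk_of_stat {c : String} (hd : c ≠ ".") (hc : stat c = true) :
    c = "" ∨ c = "#" ∨ c = "#." := by
  rcases (stat_iff c).mp hc with h | h | h | h
  · exact Or.inl h
  · exact Or.inr (Or.inl h)
  · exact absurd h hd
  · exact Or.inr (Or.inr h)

theorem not_blk_of_not_stat {c : String} (hc : ¬ stat c = true) :
    ¬ (c = "" ∨ c = "#" ∨ c = "#.") := by
  intro h
  apply hc
  rw [stat_iff]
  rcases h with h | h | h
  · exact Or.inl h
  · exact Or.inr (Or.inl h)
  · exact Or.inr (Or.inr (Or.inr h))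

-- structural spec of A's fixpoint result: segment packing with A's (substring) blockers
def TfA : List String → Nat → Nat → List String
  | [], r, d => List.replicate r "O" ++ List.replicate d "."
  | c :: t, r, d =>
    if c = "." then TfA t r (d + 1)
    else if c = "" ∨ c = "#" ∨ c = "#." then
      List.replicate r "O" ++ List.replicate d "." ++ c :: TfA t 0 0
    else TfA t (r + 1) d

-- structural spec of B's per-column pass ('#' blockers)
def TfB : List String → Nat → Nat → List String
  | [], r, d => List.replicate r "O" ++ List.replicate d "."
  | c :: t, r, d =>
    if c = "." then TfB t r (d + 1)
    else if c = "#" then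
      List.replicate r "O" ++ List.replicate d "." ++ "#" :: TfB t 0 0
    else TfB t (r + 1) d

theorem TfA_eq_TfB (t : List String) (h : ∀ c ∈ t, c ≠ "" ∧ c ≠ "#.") :
    ∀ r d, TfA t r d = TfB t r d := by
  induction t with
  | nil => intro r d; rfl
  | cons c t ih =>
    intro r d
    have hc := h c (by simp)
    have ht : ∀ x ∈ t, x ≠ "" ∧ x ≠ "#." := fun x hx => h x (by simp [hx])
    by_cases hd : c = "."
    · simp only [TfA, TfB, hd, ite_true]; exact ih ht r (d + 1)
    · by_cases hh : c = "#"
      · subst hh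
        simp [TfA, TfB, ih ht 0 0]
      · have hb : ¬ (c = "" ∨ c = "#" ∨ c = "#.") := by
          rintro (h1 | h1 | h1)
          · exact hc.1 h1
          · exact hh h1
          · exact hc.2 h1
        simp only [TfA, TfB, if_neg hd, if_neg hb, if_neg hh]
        exact ih ht (r + 1) d

theorem tiltCol_go (t : List String) : ∀ (out : List String) (r d : Nat),
    (t.foldl (fun (s : List String × Nat × Nat) ch =>
      if ch = "." then (s.1, s.2.1, s.2.2 + 1)
      else if ch = "#" then
        (s.1 ++ List.replicate s.2.1 "O" ++ List.replicate s.2.2 "." ++ ["#"], 0, 0)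
      else (s.1, s.2.1 + 1, s.2.2)) (out, r, d)).1 ++
      List.replicate (t.foldl (fun (s : List String × Nat × Nat) ch =>
      if ch = "." then (s.1, s.2.1, s.2.2 + 1)
      else if ch = "#" then
        (s.1 ++ List.replicate s.2.1 "O" ++ List.replicate s.2.2 "." ++ ["#"], 0, 0)
      else (s.1, s.2.1 + 1, s.2.2)) (out, r, d)).2.1 "O" ++
      List.replicate (t.foldl (fun (s : List String × Nat × Nat) ch =>
      if ch = "." then (s.1, s.2.1, s.2.2 + 1)
      else if ch = "#" then
        (s.1 ++ List.replicate s.2.1 "O" ++ List.replicate s.2.2 "." ++ ["#"], 0, 0)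
      else (s.1, s.2.1 + 1, s.2.2)) (out, r, d)).2.2 "." = out ++ TfB t r d := by
  induction t with
  | nil => intro out r d; simp [TfB]
  | cons c t ih =>
    intro out r d
    by_cases hd : c = "."
    · subst hd
      simp only [List.foldl_cons, if_pos rfl, TfB]
      exact ih out r (d + 1)
    · by_cases hb : c = "#"
      · simp only [List.foldl_cons, if_neg hd, if_pos hb, TfB, hb, ite_true]
        rw [ih]
        simp
      · simp only [List.foldl_cons, if_neg hd, if_neg hb, TfB, hb, ite_false]
        rw [ih]

theorem tiltCol_eq (col : List String) : tiltCol col = TfB col 0 0 := by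
  unfold tiltCol
  simpa using tiltCol_go col [] 0 0

theorem TfA_SD (t : List String) : ∀ r d,
    TfA (Sf t) r d = TfA t r d ∧ TfA (Df t) r d = TfA t r (d + 1) := by
  induction t with
  | nil =>
    intro r d
    constructor
    · rfl
    · simp [Df, TfA, List.replicate_succ']
  | cons c t ih =>
    intro r d
    have hO1 : ("O" : String) ≠ "." := by decide
    have hO2 : ¬ (("O" : String) = "" ∨ ("O" : String) = "#" ∨ ("O" : String) = "#.") := by decide
    constructor
    · by_cases hd : c = "."
      · subst hd
        simp only [Sf, if_pos rfl, TfA, ite_true]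
        exact (ih r d).2
      · by_cases hc : stat c = true
        · have hb := blk_of_stat hd hc
          simp [Sf, hd, hc, TfA, hb, (ih 0 0).1]
        · have hb := not_blk_of_not_stat hc
          simp [Sf, hd, hc, TfA, hb, hO1, hO2, (ih (r + 1) d).1]
    · by_cases hd : c = "."
      · subst hd
        simp only [Df, if_pos rfl, TfA, ite_true]
        exact (ih r (d + 1)).2
      · by_cases hc : stat c = true
        · have hb := blk_of_stat hd hc
          simp [Df, hd, hc, TfA, hb, (ih 0 0).1, List.replicate_succ']
        · have hb := not_blk_of_not_stat hc
          simp [Df, hd, hc, TfA, hb, hO1, hO2, (ih (r + 1) d).2]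

theorem TfA_fix (t : List String) :
    (Sf t = t → ∀ r, TfA t r 0 = List.replicate r "O" ++ t) ∧
    (Df t = "." :: t → ∀ r d, TfA t r (d + 1) =
      List.replicate r "O" ++ List.replicate d "." ++ "." :: t) := by
  induction t with
  | nil =>
    constructor
    · intro _ r; simp [TfA]
    · intro _ r d; simp [TfA, List.replicate_succ']
  | cons c t ih =>
    constructor
    · intro hfix r
      by_cases hd : c = "."
      · subst hd
        have hD : Df t = "." :: t := by simpa [Sf] using hfix
        simp only [TfA, ite_true]
        simpa using ih.2 hD r 0
      · by_cases hc : stat c = true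
        · have hb := blk_of_stat hd hc
          have hS : Sf t = t := by
            have h := hfix
            simp [Sf, hd, hc] at h
            exact h
          simp [TfA, hd, hb, ih.1 hS 0]
        · have h := hfix
          simp only [Sf, if_neg hd, hc, Bool.false_eq_true, ite_false, List.cons.injEq] at h
          obtain ⟨hcO, hS⟩ := h
          subst hcO
          have hb := not_blk_of_not_stat hc
          simp only [TfA, if_neg hd, if_neg hb]
          rw [ih.1 hS (r + 1)]
          simp [List.replicate_succ']
    · intro hfix r d
      by_cases hd : c = "."
      · subst hd
        have hD : Df t = "." :: t := by simpa [Df] using hfix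
        simp only [TfA, ite_true]
        rw [ih.2 hD r (d + 1)]
        simp [List.replicate_succ']
      · by_cases hc : stat c = true
        · have hb := blk_of_stat hd hc
          have hS : Sf t = t := by
            have h := hfix
            simp [Df, hd, hc] at h
            exact h
          simp [TfA, hd, hb, ih.1 hS 0, List.replicate_succ']
        · exfalso
          have h := hfix
          simp only [Df, if_neg hd, hc, Bool.false_eq_true, ite_false, List.cons.injEq] at h
          exact (by decide : ¬ ("O" : String) = ".") h.1

theorem loopGo_eq : ∀ (f : Nat) (col : List String), mu col < f → loopGo f col = TfA col 0 0 := by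
  intro f
  induction f with
  | zero => intro col h; omega
  | succ g ih =>
    intro col hf
    simp only [loopGo]
    by_cases hc : single_step col = col
    · simp only [hc, ite_true]
      have hS : Sf col = col := by rw [← (singleGo_SD col).1]; exact hc
      have := (TfA_fix col).1 hS 0
      simpa using this.symm
    · simp only [hc, ite_false]
      have hlt : mu (single_step col) < g := by
        have := mu_dec col hc
        omega
      rw [ih (single_step col) hlt]
      have hS : single_step col = Sf col := (singleGo_SD col).1
      rw [hS, (TfA_SD col 0 0).1]

theorem loopA_eq (col : List String) : loopA col = TfA col 0 0 :=
  loopGo_eq (mu col + 1) col (Nat.lt_succ_self _)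

-- ===== VERDICT (by name: the statement is the Claim_ definition above) =====
theorem multi_step_spec : Claim_equal_multi_step := by
  intro cols _ hpre
  unfold Spec_multi_step multi_step multi_step_alt
  rw [PySem.List.foldl_append_singleton_eq_map]
  exact List.map_congr_left (fun c hc => by
    rw [loopA_eq c, tiltCol_eq c, TfA_eq_TfB c (hpre c hc) 0 0])
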